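-- pv_equiv track=rewrite | github.com/gherrick0918/grimbrain | grimbrain/cli_helpers.py | _edit_distance_one
-- ===== SOURCE A (Python) =====
-- def _edit_distance_one(a: str, b: str) -> bool:
--     if abs(len(a) - len(b)) > 1:
--         return False
--     if len(a) == len(b):
--         return sum(x != y for x, y in zip(a, b)) == 1
--     if len(a) + 1 == len(b):
--         for i in range(len(b)):
--             if a[:i] == b[:i] and a[i:] == b[i + 1 :]:
--                 return True
--         return False
--     if len(b) + 1 == len(a):
--         for i in range(len(a)):
--             if a[:i] == b[:i] and a[i + 1 :] == b[i:]:
--                 return True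
--         return False
--     return False
-- ===== SOURCE B (Python) =====
-- def _edit_distance_one(a: str, b: str) -> bool:
--     if len(a) > len(b):
--         a, b = b, a
--     if len(b) - len(a) > 1:
--         return False
--     if len(a) == len(b):
--         seen = False
--         for x, y in zip(a, b):
--             if x != y:
--                 if seen:
--                     return False
--                 seen = True
--         return seen
--     # len(b) == len(a) + 1: skip the common prefix, then the rest must
--     # match after deleting one char of b
--     i = 0
--     while i < len(a) and a[i] == b[i]:
--         i += 1
--     return a[i:] == b[i + 1:]
-- ===== Notes on version B (the rewrite author's own statement) =====
-- stated objective: faster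
-- what changed: replaces the quadratic loops that compare slice pairs a[:i]==b[:i] for every i with a single left-to-right scan (one-mismatch flag for equal lengths; skip-common-prefix then one suffix comparison for lengths differing by one), after normalising so the shorter string comes first
import Mathlib
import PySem

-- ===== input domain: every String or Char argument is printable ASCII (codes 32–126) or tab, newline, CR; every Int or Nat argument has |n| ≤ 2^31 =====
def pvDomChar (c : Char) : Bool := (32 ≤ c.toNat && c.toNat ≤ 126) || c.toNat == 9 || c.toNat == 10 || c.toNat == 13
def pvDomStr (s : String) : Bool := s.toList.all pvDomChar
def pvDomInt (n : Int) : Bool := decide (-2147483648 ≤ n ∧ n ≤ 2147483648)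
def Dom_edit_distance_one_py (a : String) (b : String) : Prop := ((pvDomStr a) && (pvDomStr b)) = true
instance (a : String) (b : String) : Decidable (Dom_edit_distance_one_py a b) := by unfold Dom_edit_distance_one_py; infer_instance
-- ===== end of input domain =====

-- B replaces A's quadratic slice-comparison loops with a single linear scan; proved equal on all inputs.


-- ===== PORT A =====
-- for i in range(len(b)): if a[:i] == b[:i] and a[i:] == b[i+1:]: return True  (insert case)
def pvScanIns (la lb : List Char) (i : Nat) : Nat → Bool
  | 0 => false
  | fuel + 1 =>
    if la.take i == lb.take i && la.drop i == lb.drop (i + 1) then true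
    else pvScanIns la lb (i + 1) fuel

-- for i in range(len(a)): if a[:i] == b[:i] and a[i+1:] == b[i:]: return True  (delete case)
def pvScanDel (la lb : List Char) (i : Nat) : Nat → Bool
  | 0 => false
  | fuel + 1 =>
    if la.take i == lb.take i && la.drop (i + 1) == lb.drop i then true
    else pvScanDel la lb (i + 1) fuel

def edit_distance_one_py (a : String) (b : String) : Bool :=
  let la := a.toList
  let lb := b.toList
  if ((la.length : Int) - (lb.length : Int)).natAbs > 1 then false
  else if la.length = lb.length then
    ((la.zip lb).foldl (fun (s : Int) p => s + (if p.1 ≠ p.2 then 1 else 0)) 0) == 1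
  else if la.length + 1 = lb.length then pvScanIns la lb 0 lb.length
  else if lb.length + 1 = la.length then pvScanDel la lb 0 la.length
  else false

-- ===== PORT B =====
-- equal-length scan with a one-mismatch flag (early False on a second mismatch)
def pvEqScan : List Char → List Char → Bool → Bool
  | x :: xs, y :: ys, seen =>
    if x ≠ y then (if seen then false else pvEqScan xs ys true)
    else pvEqScan xs ys seen
  | _, _, seen => seen

-- while i < len(a) and a[i] == b[i]: i += 1;  return a[i:] == b[i+1:]
def pvSkipScan : List Char → List Char → Bool
  | x :: xs, y :: ys => if x = y then pvSkipScan xs ys else (x :: xs) == ys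
  | xs, ys => xs == ys.drop 1

def edit_distance_one_py_alt (a : String) (b : String) : Bool :=
  let la := a.toList
  let lb := b.toList
  let p := if la.length > lb.length then (lb, la) else (la, lb)
  if p.2.length - p.1.length > 1 then false
  else if p.1.length = p.2.length then pvEqScan p.1 p.2 false
  else pvSkipScan p.1 p.2

-- ===== PRECONDITION & SPEC =====
def Spec_edit_distance_one_py (a : String) (b : String) (out : Bool) : Prop := out = edit_distance_one_py_alt a b
instance (a : String) (b : String) (out : Bool) : Decidable (Spec_edit_distance_one_py a b out) := by unfold Spec_edit_distance_one_py; infer_instance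

-- ===== CLAIM (what is proved, stated in full; the proofs are below) =====
def Claim_equal_edit_distance_one_py : Prop := ∀ (a : String) (b : String), Dom_edit_distance_one_py a b → Spec_edit_distance_one_py a b (edit_distance_one_py a b)

-- ===== LEMMAS AND PROOFS =====

def pvCountMis : List Char → List Char → Nat
  | x :: xs, y :: ys => (if x = y then 0 else 1) + pvCountMis xs ys
  | _, _ => 0

theorem pvFold_count (xs ys : List Char) (acc : Int) :
    (xs.zip ys).foldl (fun (s : Int) p => s + (if p.1 ≠ p.2 then 1 else 0)) acc
      = acc + pvCountMis xs ys := by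
  induction xs generalizing ys acc with
  | nil => simp [pvCountMis]
  | cons x xs ih =>
    cases ys with
    | nil => simp [pvCountMis]
    | cons y ys =>
      simp only [List.zip_cons_cons, List.foldl_cons, ih, pvCountMis]
      by_cases h : x = y
      · simp [h]
      · simp [h]; ring

theorem pvEqScan_count (xs ys : List Char) (seen : Bool) :
    pvEqScan xs ys seen = (pvCountMis xs ys + (if seen then 1 else 0) == 1) := by
  induction xs generalizing ys seen with
  | nil => cases seen <;> simp [pvEqScan, pvCountMis]
  | cons x xs ih =>
    cases ys with
    | nil => cases seen <;> simp [pvEqScan, pvCountMis]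
    | cons y ys =>
      by_cases h : x = y
      · simp [pvEqScan, pvCountMis, h, ih]
      · cases seen
        · simp [pvEqScan, pvCountMis, h, ih, Nat.add_comm 1]
        · simp [pvEqScan, pvCountMis, h]
theorem pvScanIns_shift (x : Char) (xs ys : List Char) (fuel i : Nat) :
    pvScanIns (x :: xs) (x :: ys) (i + 1) fuel = pvScanIns xs ys i fuel := by
  induction fuel generalizing i with
  | zero => rfl
  | succ n ih => simp [pvScanIns, ih]

theorem pvScanIns_fail (x y : Char) (xs ys : List Char) (h : x ≠ y) (fuel i : Nat) :
    pvScanIns (x :: xs) (y :: ys) (i + 1) fuel = false := by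
  induction fuel generalizing i with
  | zero => rfl
  | succ n ih => simp [pvScanIns, List.take_succ_cons, h, ih]

theorem pvSkipScan_dup (l : List Char) (c : Char) : pvSkipScan l (c :: l) = true := by
  induction l generalizing c with
  | nil => rfl
  | cons a as ih =>
    by_cases h : a = c
    · subst h; simp [pvSkipScan, ih]
    · simp [pvSkipScan, h]

theorem pvScanIns_eq_skip (xs ys : List Char) (h : ys.length = xs.length + 1) :
    pvScanIns xs ys 0 ys.length = pvSkipScan xs ys := by
  induction xs generalizing ys with
  | nil =>
    match ys, h with
    | [y], _ => rfl
  | cons x xs ih =>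
    cases ys with
    | nil => simp at h
    | cons y ys =>
      have hy : ys.length = xs.length + 1 := by simpa using h
      by_cases hxy : x = y
      · subst hxy
        simp only [pvScanIns, List.length_cons, List.take_zero, List.drop_zero,
          List.drop_succ_cons, beq_self_eq_true, Bool.true_and]
        rw [pvScanIns_shift, ih ys hy,
          show pvSkipScan (x :: xs) (x :: ys) = pvSkipScan xs ys by simp [pvSkipScan]]
        by_cases hc : (x :: xs) = ys
        · subst hc
          simp [pvSkipScan_dup]
        · simp [hc]
      · simp only [pvScanIns, List.length_cons, List.take_zero, List.drop_zero,
          List.drop_succ_cons, beq_self_eq_true, Bool.true_and]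
        rw [pvScanIns_fail x y xs ys hxy,
          show pvSkipScan (x :: xs) (y :: ys) = ((x :: xs : List Char) == ys) by
            rw [show pvSkipScan (x :: xs) (y :: ys)
                  = if x = y then pvSkipScan xs ys else ((x :: xs : List Char) == ys) from rfl,
              if_neg hxy]]
        cases hcb : ((x :: xs : List Char) == ys)
        · simp
        · simp

theorem pvScanDel_eq_scanIns (la lb : List Char) (i fuel : Nat) :
    pvScanDel la lb i fuel = pvScanIns lb la i fuel := by
  induction fuel generalizing i with
  | zero => rfl
  | succ n ih =>
    simp only [pvScanDel, pvScanIns, ih]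
    rw [Bool.beq_comm (a := la.take i) (b := lb.take i), Bool.beq_comm (a := la.drop (i + 1)) (b := lb.drop i)]

theorem pvMain (la lb : List Char) :
    (if ((la.length : Int) - (lb.length : Int)).natAbs > 1 then false
     else if la.length = lb.length then
       ((la.zip lb).foldl (fun (s : Int) p => s + (if p.1 ≠ p.2 then 1 else 0)) 0) == 1
     else if la.length + 1 = lb.length then pvScanIns la lb 0 lb.length
     else if lb.length + 1 = la.length then pvScanDel la lb 0 la.length
     else false)
    = (let p := if la.length > lb.length then (lb, la) else (la, lb)
       if p.2.length - p.1.length > 1 then false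
       else if p.1.length = p.2.length then pvEqScan p.1 p.2 false
       else pvSkipScan p.1 p.2) := by
  by_cases hs : la.length > lb.length
  · simp only [if_pos hs]
    by_cases h1 : la.length - lb.length > 1
    · have hA : ((la.length : Int) - (lb.length : Int)).natAbs > 1 := by omega
      simp [hA, h1]
    · have hd : lb.length + 1 = la.length := by omega
      have hA : ¬ ((la.length : Int) - (lb.length : Int)).natAbs > 1 := by omega
      have hne : ¬ la.length = lb.length := by omega
      have hni : ¬ la.length + 1 = lb.length := by omega
      have hne2 : ¬ lb.length = la.length := by omega
      simp only [if_neg hA, if_neg hne, if_neg hni, if_pos hd, if_neg h1, if_neg hne2]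
      rw [pvScanDel_eq_scanIns]
      exact pvScanIns_eq_skip lb la hd.symm
  · simp only [if_neg hs]
    by_cases h1 : lb.length - la.length > 1
    · have hA : ((la.length : Int) - (lb.length : Int)).natAbs > 1 := by omega
      simp [hA, h1]
    · by_cases heq : la.length = lb.length
      · have hA : ¬ ((la.length : Int) - (lb.length : Int)).natAbs > 1 := by omega
        simp only [if_neg hA, if_pos heq, if_neg h1]
        rw [pvFold_count, pvEqScan_count]
        by_cases hc : pvCountMis la lb = 1 <;> simp [hc]
      · have hi : la.length + 1 = lb.length := by omega
        have hA : ¬ ((la.length : Int) - (lb.length : Int)).natAbs > 1 := by omega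
        simp only [if_neg hA, if_neg heq, if_pos hi, if_neg h1]
        exact pvScanIns_eq_skip la lb hi.symm

-- ===== VERDICT (by name: the statement is the Claim_ definition above) =====
theorem edit_distance_one_py_spec : Claim_equal_edit_distance_one_py := by
  intro a b _
  exact pvMain a.toList b.toList
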